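-- pv_equiv track=rewrite | github.com/svend4/meta | projects/hexdim/hexdim.py | find_subcube_of
-- ===== SOURCE A (Python) =====
-- def find_subcube_of(vertices):
--     """
--     Минимальный подкуб Q6, содержащий данное множество вершин.
--     Возвращает (free_axes, base, size).
--     Вычисляется через XOR-замыкание (аффинное подпространство).
--     """
--     vertices = list(vertices)
--     if not vertices:
--         return [], 0, 0
--     anchor = vertices[0]
--     # Свободные оси — позиции, в которых вершины отличаются от anchor
--     diff_bits = 0
--     for v in vertices:
--         diff_bits |= (v ^ anchor)
--     free_axes = [i for i in range(6) if (diff_bits >> i) & 1]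
--     base = anchor & ~diff_bits
--     return free_axes, base, len(free_axes)
-- ===== SOURCE B (Python) =====
-- def find_subcube_of(vertices):
--     """
--     Минимальный подкуб Q6, содержащий данное множество вершин.
--     Возвращает (free_axes, base, size).
--     Разделяй-и-властвуй: рекурсивно сливает минимальные подкубы
--     (base, mask) двух половин списка вершин.
--     """
--     vs = list(vertices)
--     if not vs:
--         return [], 0, 0
--
--     def merge(cube1, cube2):
--         # smallest subcube containing both subcubes
--         b1, m1 = cube1
--         b2, m2 = cube2
--         m = m1 | m2 | (b1 ^ b2)
--         return b1 & ~m, m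
--
--     def subcube(seg):
--         if len(seg) == 1:
--             return seg[0], 0
--         mid = len(seg) // 2
--         return merge(subcube(seg[:mid]), subcube(seg[mid:]))
--
--     base, mask = subcube(vs)
--     free_axes = [i for i in range(6) if (mask >> i) & 1]
--     return free_axes, base, len(free_axes)
-- ===== Notes on version B (the rewrite author's own statement) =====
-- stated objective: alternative
-- what changed: B replaces A's linear anchor pass (diff_bits = OR of v XOR vertices[0], base = anchor & ~diff_bits) by a divide-and-conquer recursion: it recursively computes the minimal subcube (base, mask) of each half of the vertex list and merges two subcubes with m = m1|m2|(b1^b2), b = b1&~m.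
import Mathlib
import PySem

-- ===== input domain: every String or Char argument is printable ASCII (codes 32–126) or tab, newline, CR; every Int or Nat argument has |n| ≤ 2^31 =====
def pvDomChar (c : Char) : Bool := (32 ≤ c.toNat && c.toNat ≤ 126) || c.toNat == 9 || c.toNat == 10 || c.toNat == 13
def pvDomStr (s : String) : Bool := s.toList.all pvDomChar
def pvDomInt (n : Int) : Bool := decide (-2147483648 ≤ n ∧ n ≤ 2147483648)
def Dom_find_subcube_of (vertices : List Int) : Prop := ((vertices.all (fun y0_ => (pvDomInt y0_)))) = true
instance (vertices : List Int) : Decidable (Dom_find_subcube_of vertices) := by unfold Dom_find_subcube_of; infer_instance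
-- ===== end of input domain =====

-- B replaces A's linear anchor/XOR-OR pass by a divide-and-conquer recursion that merges the
-- minimal subcubes (base, mask) of the two halves of the vertex list; objective: alternative
-- algorithm, same result.

-- ===== PORT A =====
-- literal port of Source A: anchor = vertices[0]; diff_bits = OR of (v ^ anchor); the `>>> i.toNat`
-- is exact because i ranges over range(6), so 0 ≤ i.
def find_subcube_of (vertices : List Int) : List Int × Int × Int :=
  match vertices with
  | [] => ([], 0, 0)
  | v0 :: rest =>
    let anchor := v0
    let diff_bits := (v0 :: rest).foldl (fun d v => PySem.Int.bor d (PySem.Int.bxor v anchor)) 0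
    let free_axes := (PySem.List.pyRange 0 6 1).filter
      (fun i => PySem.Int.band (diff_bits >>> i.toNat) 1 != 0)
    let base := PySem.Int.band anchor (Int.not diff_bits)
    (free_axes, base, (free_axes.length : Int))

-- ===== PORT B =====
-- literal port of Source B's merge: smallest subcube containing two subcubes (base, mask)
def pvMerge (c1 c2 : Int × Int) : Int × Int :=
  let m := PySem.Int.bor (PySem.Int.bor c1.2 c2.2) (PySem.Int.bxor c1.1 c2.1)
  (PySem.Int.band c1.1 (Int.not m), m)

-- literal port of Source B's subcube: Python only calls it on nonempty segments, so the [] case is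
-- unreachable; mid = len(seg)//2 ≥ 0, so seg[:mid] = take mid, seg[mid:] = drop mid (exact,
-- PySem.List.slice_to_natCast / slice_from_natCast).
def pvSubcube : List Int → Int × Int
  | [] => (0, 0)
  | [v] => (v, 0)
  | v :: w :: t =>
    let seg := v :: w :: t
    let mid := seg.length / 2
    pvMerge (pvSubcube (seg.take mid)) (pvSubcube (seg.drop mid))
termination_by l => l.length
decreasing_by
  · simp only [List.length_take, List.length_cons]; omega
  · simp only [List.length_drop, List.length_cons]; omega

def find_subcube_of_alt (vertices : List Int) : List Int × Int × Int :=
  match vertices with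
  | [] => ([], 0, 0)
  | v :: t =>
    let bm := pvSubcube (v :: t)
    let free_axes := (PySem.List.pyRange 0 6 1).filter
      (fun i => PySem.Int.band (bm.2 >>> i.toNat) 1 != 0)
    (free_axes, bm.1, (free_axes.length : Int))

-- ===== PRECONDITION & SPEC =====
def Spec_find_subcube_of (vertices : List Int) (out : List Int × Int × Int) : Prop := out = find_subcube_of_alt vertices
instance (vertices : List Int) (out : List Int × Int × Int) : Decidable (Spec_find_subcube_of vertices out) := by unfold Spec_find_subcube_of; infer_instance

-- ===== CLAIM (what is proved, stated in full; the proofs are below) =====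
def Claim_equal_find_subcube_of : Prop := ∀ (vertices : List Int), Dom_find_subcube_of vertices → Spec_find_subcube_of vertices (find_subcube_of vertices)

-- ===== LEMMAS AND PROOFS =====

-- x - (x AND y) = x AND NOT y, on Nat
theorem pv_sub_and_eq_ldiff (x : Nat) : ∀ y : Nat, x - (x &&& y) = Nat.ldiff x y := by
  induction x using Nat.binaryRec with
  | zero => intro y; simp [Nat.ldiff]
  | bit a m ih =>
    intro y
    rw [← Nat.bit_testBit_zero_shiftRight_one y, Nat.land_bit, Nat.ldiff_bit]
    have h1 := ih (y >>> 1)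
    have h2 : m &&& (y >>> 1) ≤ m := Nat.and_le_left
    rw [Nat.bit_val, Nat.bit_val, Nat.bit_val]
    cases a <;> cases y.testBit 0 <;> simp only [Bool.and_false, Bool.and_true, Bool.not_false,
      Bool.not_true, Bool.toNat_false, Bool.toNat_true] <;> omega

-- the i-th two's-complement bit of an Int, as PySem's bitwise ops read it
def pvBit (a : Int) (i : Nat) : Bool :=
  if 0 ≤ a then a.toNat.testBit i else !((-a - 1).toNat.testBit i)

theorem pvBit_zero (i : Nat) : pvBit 0 i = false := by
  simp [pvBit]

theorem pvBit_inj (a b : Int) (h : ∀ i, pvBit a i = pvBit b i) : a = b := by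
  by_cases ha : 0 ≤ a <;> by_cases hb : 0 ≤ b
  · have : a.toNat = b.toNat := by
      apply Nat.eq_of_testBit_eq
      intro i
      have := h i
      simpa [pvBit, ha, hb] using this
    omega
  · exfalso
    have hh := h (a.toNat + (-b - 1).toNat)
    have h1 : a.toNat.testBit (a.toNat + (-b - 1).toNat) = false :=
      Nat.testBit_lt_two_pow (Nat.lt_of_le_of_lt (Nat.le_add_right _ _) Nat.lt_two_pow_self)
    have h2 : (-b - 1).toNat.testBit (a.toNat + (-b - 1).toNat) = false :=
      Nat.testBit_lt_two_pow (Nat.lt_of_le_of_lt (Nat.le_add_left _ _) Nat.lt_two_pow_self)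
    unfold pvBit at hh
    rw [if_pos ha, if_neg hb, h1, h2] at hh
    simp at hh
  · exfalso
    have hh := h (b.toNat + (-a - 1).toNat)
    have h1 : b.toNat.testBit (b.toNat + (-a - 1).toNat) = false :=
      Nat.testBit_lt_two_pow (Nat.lt_of_le_of_lt (Nat.le_add_right _ _) Nat.lt_two_pow_self)
    have h2 : (-a - 1).toNat.testBit (b.toNat + (-a - 1).toNat) = false :=
      Nat.testBit_lt_two_pow (Nat.lt_of_le_of_lt (Nat.le_add_left _ _) Nat.lt_two_pow_self)
    unfold pvBit at hh
    rw [if_neg ha, if_pos hb, h1, h2] at hh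
    simp at hh
  · have : (-a - 1).toNat = (-b - 1).toNat := by
      apply Nat.eq_of_testBit_eq
      intro i
      have := h i
      simpa [pvBit, ha, hb] using this
    omega

theorem pvBit_natCast (n : Nat) (i : Nat) : pvBit (n : Int) i = n.testBit i := by
  simp [pvBit]

theorem pvBit_negCast (n : Nat) (i : Nat) : pvBit (-(n : Int) - 1) i = !(n.testBit i) := by
  have h : ¬ (0 ≤ -(n : Int) - 1) := by omega
  have h2 : -(-(n : Int) - 1) - 1 = (n : Int) := by ring
  unfold pvBit
  rw [if_neg h, h2, Int.toNat_natCast]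

theorem pvBit_band (a b : Int) (i : Nat) : pvBit (PySem.Int.band a b) i = (pvBit a i && pvBit b i) := by
  unfold PySem.Int.band
  split_ifs with ha hb hb
  · rw [pvBit_natCast, Nat.testBit_and]
    unfold pvBit
    rw [if_pos ha, if_pos hb]
  · rw [pvBit_natCast, pv_sub_and_eq_ldiff, Nat.testBit_ldiff]
    unfold pvBit
    rw [if_pos ha, if_neg hb]
  · rw [pvBit_natCast, pv_sub_and_eq_ldiff, Nat.testBit_ldiff]
    unfold pvBit
    rw [if_neg ha, if_pos hb]
    exact Bool.and_comm _ _
  · rw [pvBit_negCast, Nat.testBit_or]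
    unfold pvBit
    rw [if_neg ha, if_neg hb, Bool.not_or]

theorem pvBit_bor (a b : Int) (i : Nat) : pvBit (PySem.Int.bor a b) i = (pvBit a i || pvBit b i) := by
  unfold PySem.Int.bor
  split_ifs with ha hb hb
  · rw [pvBit_natCast, Nat.testBit_or]
    unfold pvBit
    rw [if_pos ha, if_pos hb]
  · rw [pvBit_negCast, pv_sub_and_eq_ldiff, Nat.testBit_ldiff]
    unfold pvBit
    rw [if_pos ha, if_neg hb]
    cases a.toNat.testBit i <;> cases (-b - 1).toNat.testBit i <;> rfl
  · rw [pvBit_negCast, pv_sub_and_eq_ldiff, Nat.testBit_ldiff]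
    unfold pvBit
    rw [if_neg ha, if_pos hb]
    cases b.toNat.testBit i <;> cases (-a - 1).toNat.testBit i <;> rfl
  · rw [pvBit_negCast, Nat.testBit_and]
    unfold pvBit
    rw [if_neg ha, if_neg hb, Bool.not_and]

theorem pvBit_bxor (a b : Int) (i : Nat) : pvBit (PySem.Int.bxor a b) i = (xor (pvBit a i) (pvBit b i)) := by
  unfold PySem.Int.bxor
  split_ifs with ha hb hb
  · rw [pvBit_natCast, Nat.testBit_xor]
    unfold pvBit
    rw [if_pos ha, if_pos hb]
  · rw [pvBit_negCast, Nat.testBit_xor]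
    unfold pvBit
    rw [if_pos ha, if_neg hb]
    cases a.toNat.testBit i <;> cases (-b - 1).toNat.testBit i <;> rfl
  · rw [pvBit_negCast, Nat.testBit_xor]
    unfold pvBit
    rw [if_neg ha, if_pos hb]
    cases b.toNat.testBit i <;> cases (-a - 1).toNat.testBit i <;> rfl
  · rw [pvBit_natCast, Nat.testBit_xor]
    unfold pvBit
    rw [if_neg ha, if_neg hb]
    cases (-a - 1).toNat.testBit i <;> cases (-b - 1).toNat.testBit i <;> rfl

theorem pvBit_not (a : Int) (i : Nat) : pvBit (Int.not a) i = !(pvBit a i) := by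
  have hna : Int.not a = -a - 1 := by
    cases a with
    | ofNat n => simp [Int.not]; omega
    | negSucc n => simp [Int.not]
  rw [hna]
  by_cases ha : 0 ≤ a
  · have := pvBit_negCast a.toNat i
    rw [show -a - 1 = -(a.toNat : Int) - 1 by omega]
    rw [this]
    simp [pvBit, ha]
  · have h0 : (0 : Int) ≤ -a - 1 := by omega
    have h2 : (-a - 1) = (((-a - 1).toNat : Nat) : Int) := by omega
    rw [h2, pvBit_natCast]
    simp [pvBit, ha]

-- the bit of an AND-fold is the seed's bit AND-ed with every element's bit (likewise OR/any)
theorem pvBit_foldl_and (t : List Int) (i : Nat) : ∀ v : Int,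
    pvBit (t.foldl (fun a x => PySem.Int.band a x) v) i = (pvBit v i && t.all (fun x => pvBit x i)) := by
  induction t with
  | nil => intro v; simp
  | cons x s ih =>
    intro v
    simp only [List.foldl_cons, List.all_cons, ih, pvBit_band, Bool.and_assoc]

theorem pvBit_foldl_or (t : List Int) (i : Nat) : ∀ v : Int,
    pvBit (t.foldl (fun a x => PySem.Int.bor a x) v) i = (pvBit v i || t.any (fun x => pvBit x i)) := by
  induction t with
  | nil => intro v; simp
  | cons x s ih =>
    intro v
    simp only [List.foldl_cons, List.any_cons, ih, pvBit_bor, Bool.or_assoc]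

-- pushing pvBit through A's diff fold
theorem pvBit_foldl_diff (l : List Int) (a : Int) (i : Nat) : ∀ d : Int,
    pvBit (l.foldl (fun d v => PySem.Int.bor d (PySem.Int.bxor v a)) d) i
      = l.foldl (fun db v => db || xor (pvBit v i) (pvBit a i)) (pvBit d i) := by
  induction l with
  | nil => intro d; rfl
  | cons v t ih => intro d; simp only [List.foldl_cons, ih, pvBit_bor, pvBit_bxor]

-- Boolean heart of the A-side argument: the OR of (b XOR anchor) is (OR of b's) XOR (AND of b's).
theorem pv_bool_diff (a : Bool) (i : Nat) (bl : List Int) : ∀ o n d : Bool, xor o n = d → (a || o) = o → (n && a) = n →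
    bl.foldl (fun db v => db || xor (pvBit v i) a) d
      = xor (o || bl.any (fun x => pvBit x i)) (n && bl.all (fun x => pvBit x i)) := by
  induction bl with
  | nil => intro o n d h _ _; simp [List.foldl_nil, ← h]
  | cons v t ih =>
    intro o n d h ho hn
    simp only [List.foldl_cons, List.any_cons, List.all_cons]
    have := ih (o || pvBit v i) (n && pvBit v i) (d || xor (pvBit v i) a)
      (by revert h ho hn; cases a <;> cases o <;> cases n <;> cases d <;> cases (pvBit v i) <;> decide)
      (by revert ho; cases a <;> cases o <;> cases (pvBit v i) <;> decide)
      (by revert hn; cases a <;> cases n <;> cases (pvBit v i) <;> decide)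
    rw [this, Bool.or_assoc, Bool.and_assoc]

theorem pv_bool_base (a : Bool) (i : Nat) (bl : List Int) : ∀ o n : Bool, (a || o) = o → (n && a) = n →
    (a && !(xor (o || bl.any (fun x => pvBit x i)) (n && bl.all (fun x => pvBit x i))))
      = (n && bl.all (fun x => pvBit x i)) := by
  induction bl with
  | nil => intro o n ho hn; simp only [List.any_nil, List.all_nil, Bool.or_false, Bool.and_true]; revert ho hn; cases a <;> cases o <;> cases n <;> decide
  | cons v t ih =>
    intro o n ho hn
    simp only [List.any_cons, List.all_cons]
    rw [← Bool.or_assoc, ← Bool.and_assoc]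
    exact ih (o || pvBit v i) (n && pvBit v i)
      (by revert ho; cases a <;> cases o <;> cases (pvBit v i) <;> decide)
      (by revert hn; cases a <;> cases n <;> cases (pvBit v i) <;> decide)

-- A's diff_bits equals (OR of all vertices) XOR (AND of all vertices)
theorem pv_diff_eq (v0 : Int) (rest : List Int) :
    (v0 :: rest).foldl (fun d v => PySem.Int.bor d (PySem.Int.bxor v v0)) 0
      = PySem.Int.bxor (rest.foldl (fun a x => PySem.Int.bor a x) v0)
                       (rest.foldl (fun a x => PySem.Int.band a x) v0) := by
  apply pvBit_inj
  intro i
  rw [pvBit_foldl_diff, pvBit_bxor, pvBit_foldl_or, pvBit_foldl_and]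
  simp only [List.foldl_cons, pvBit_zero, Bool.false_or, Bool.xor_self]
  exact pv_bool_diff (pvBit v0 i) i rest (pvBit v0 i) (pvBit v0 i) false (by simp) (by simp) (by simp)

-- A's base equals the AND of all vertices
theorem pv_base_eq (v0 : Int) (rest : List Int) :
    PySem.Int.band v0 (Int.not ((v0 :: rest).foldl (fun d v => PySem.Int.bor d (PySem.Int.bxor v v0)) 0))
      = rest.foldl (fun a x => PySem.Int.band a x) v0 := by
  apply pvBit_inj
  intro i
  rw [pvBit_band, pvBit_not, pv_diff_eq, pvBit_bxor, pvBit_foldl_or, pvBit_foldl_and]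
  exact pv_bool_base (pvBit v0 i) i rest (pvBit v0 i) (pvBit v0 i) (by simp) (by simp)

-- pvSubcube of a nonempty list computes (AND of all vertices, OR XOR AND of all vertices)
theorem pvSubcube_spec : ∀ (n : Nat) (v : Int) (t : List Int), (v :: t).length ≤ n →
    pvSubcube (v :: t) = (t.foldl (fun a x => PySem.Int.band a x) v,
      PySem.Int.bxor (t.foldl (fun a x => PySem.Int.bor a x) v)
                     (t.foldl (fun a x => PySem.Int.band a x) v)) := by
  intro n
  induction n with
  | zero => intro v t h; simp at h
  | succ n ih =>
    intro v t hlen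
    match t with
    | [] =>
      simp only [pvSubcube, List.foldl_nil]
      refine Prod.ext rfl ?_
      apply pvBit_inj
      intro i
      rw [pvBit_bxor, pvBit_zero, Bool.xor_self]
    | w :: t' =>
      rw [pvSubcube]
      set seg := v :: w :: t' with hseg
      set mid := seg.length / 2 with hmid
      have hlenseg : seg.length = t'.length + 2 := by simp [hseg]
      have hmid1 : 1 ≤ mid := by omega
      have hmidlt : mid < seg.length := by omega
      -- heads/tails of the two halves
      have htake : seg.take mid = v :: (w :: t').take (mid - 1) := by
        obtain ⟨k, hk⟩ : ∃ k, mid = k + 1 := ⟨mid - 1, by omega⟩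
        rw [hseg, hk]
        simp
      have hdropne : seg.drop mid ≠ [] := by
        intro hc
        have := List.drop_eq_nil_iff.mp hc
        omega
      obtain ⟨v2, t2, hdrop⟩ := List.exists_cons_of_ne_nil hdropne
      set t1 := (w :: t').take (mid - 1) with ht1
      have happ : (v :: t1) ++ (v2 :: t2) = seg := by
        rw [← htake, ← hdrop]; exact List.take_append_drop _ _
      have htail : t1 ++ (v2 :: t2) = w :: t' := by
        have := happ
        rw [hseg] at this
        simpa using this
      -- lengths of the halves for the IH
      have hl1 : (v :: t1).length ≤ n := by
        have : (v :: t1).length = mid := by rw [← htake]; simp [List.length_take]; omega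
        omega
      have hl2 : (v2 :: t2).length ≤ n := by
        have : (v2 :: t2).length = seg.length - mid := by rw [← hdrop]; simp
        omega
      rw [htake, hdrop, ih v t1 hl1, ih v2 t2 hl2]
      -- combine, per bit
      unfold pvMerge
      simp only
      rw [← htail]
      have hmask : PySem.Int.bor
            (PySem.Int.bor
              (PySem.Int.bxor (t1.foldl (fun a x => PySem.Int.bor a x) v)
                              (t1.foldl (fun a x => PySem.Int.band a x) v))
              (PySem.Int.bxor (t2.foldl (fun a x => PySem.Int.bor a x) v2)
                              (t2.foldl (fun a x => PySem.Int.band a x) v2)))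
            (PySem.Int.bxor (t1.foldl (fun a x => PySem.Int.band a x) v)
                            (t2.foldl (fun a x => PySem.Int.band a x) v2))
          = PySem.Int.bxor ((t1 ++ v2 :: t2).foldl (fun a x => PySem.Int.bor a x) v)
                           ((t1 ++ v2 :: t2).foldl (fun a x => PySem.Int.band a x) v) := by
        apply pvBit_inj
        intro i
        rw [pvBit_bor, pvBit_bor, pvBit_bxor, pvBit_bxor, pvBit_bxor, pvBit_bxor,
          pvBit_foldl_or, pvBit_foldl_and, pvBit_foldl_or, pvBit_foldl_and,
          pvBit_foldl_or, pvBit_foldl_and, List.any_append, List.all_append,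
          List.any_cons, List.all_cons]
        cases pvBit v i <;> cases pvBit v2 i <;>
          cases t1.any (fun x => pvBit x i) <;> cases t1.all (fun x => pvBit x i) <;>
          cases t2.any (fun x => pvBit x i) <;> cases t2.all (fun x => pvBit x i) <;> rfl
      rw [hmask]
      refine Prod.ext ?_ rfl
      apply pvBit_inj
      intro i
      rw [pvBit_band, pvBit_not, pvBit_bxor, pvBit_foldl_or, pvBit_foldl_and,
        pvBit_foldl_and, List.any_append, List.all_append,
        List.any_cons, List.all_cons]
      cases pvBit v i <;> cases pvBit v2 i <;>
        cases t1.any (fun x => pvBit x i) <;> cases t1.all (fun x => pvBit x i) <;>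
        cases t2.any (fun x => pvBit x i) <;> cases t2.all (fun x => pvBit x i) <;> rfl

-- ===== VERDICT (by name: the statement is the Claim_ definition above) =====
theorem find_subcube_of_spec : Claim_equal_find_subcube_of := by
  intro vertices _
  unfold Spec_find_subcube_of find_subcube_of find_subcube_of_alt
  match vertices with
  | [] => rfl
  | v0 :: rest =>
    simp only [pvSubcube_spec (v0 :: rest).length v0 rest (le_refl _),
      ← pv_diff_eq v0 rest, pv_base_eq v0 rest]
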